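-- pv_equiv track=rewrite | github.com/lbestd/zabbixnophp | api/tags.py | build_tag_sql
-- ===== SOURCE A (Python) =====
-- def build_tag_sql(tags, evaltype, args: list, id_col: str, tag_table: str, fk_col: str) -> str | None:
--     """
--     Build a SQL EXISTS / NOT EXISTS fragment for tag filtering.
--
--     id_col   — column in tag_table that links back to parent (e.g. 'hostid', 'itemid', 'triggerid')
--     tag_table — e.g. 'host_tag', 'item_tag', 'trigger_tag', 'problem_tag'
--     fk_col   — the id column in the outer query (e.g. 'h.hostid')
--     evaltype 0 = AND/OR: for same tag name → OR; across different names → AND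
--     evaltype 1 = OR: any condition matches
--     evaltype 2 = AND: all conditions must match
--     """
--     if not tags:
--         return None
--
--     conditions = []
--     for t in tags:
--         tag_name = str(t.get("tag", ""))
--         tag_val  = str(t.get("value", ""))
--         op       = int(t.get("operator", 0))
--
--         if op == 4:  # exists (tag name present, any value)
--             args.append(tag_name)
--             n = len(args)
--             conditions.append(
--                 f"EXISTS (SELECT 1 FROM {tag_table} tt WHERE tt.{id_col}={fk_col} AND tt.tag=${n})"
--             )
--         elif op == 5:  # does not exist
--             args.append(tag_name)
--             n = len(args)
--             conditions.append(
--                 f"NOT EXISTS (SELECT 1 FROM {tag_table} tt WHERE tt.{id_col}={fk_col} AND tt.tag=${n})"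
--             )
--         elif op == 1:  # equals
--             args.append(tag_name); args.append(tag_val)
--             n = len(args)
--             conditions.append(
--                 f"EXISTS (SELECT 1 FROM {tag_table} tt WHERE tt.{id_col}={fk_col} AND tt.tag=${n-1} AND tt.value=${n})"
--             )
--         elif op == 3:  # does not equal
--             args.append(tag_name); args.append(tag_val)
--             n = len(args)
--             conditions.append(
--                 f"NOT EXISTS (SELECT 1 FROM {tag_table} tt WHERE tt.{id_col}={fk_col} AND tt.tag=${n-1} AND tt.value=${n})"
--             )
--         elif op == 2:  # does not contain
--             args.append(tag_name); args.append(f"%{tag_val}%")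
--             n = len(args)
--             conditions.append(
--                 f"NOT EXISTS (SELECT 1 FROM {tag_table} tt WHERE tt.{id_col}={fk_col} AND tt.tag=${n-1} AND tt.value ILIKE ${n})"
--             )
--         else:  # 0 = contains (default)
--             args.append(tag_name); args.append(f"%{tag_val}%")
--             n = len(args)
--             conditions.append(
--                 f"EXISTS (SELECT 1 FROM {tag_table} tt WHERE tt.{id_col}={fk_col} AND tt.tag=${n-1} AND tt.value ILIKE ${n})"
--             )
--
--     if not conditions:
--         return None
--
--     ev = int(evaltype) if evaltype is not None else 0
--     joiner = " OR " if ev == 1 else " AND "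
--     return "(" + joiner.join(conditions) + ")"
-- ===== SOURCE B (Python) =====
-- # Staged-pipeline version: instead of one pass that interleaves appending to
-- # `args` with formatting, B first normalizes each tag to an (op, params) row,
-- # then computes every placeholder position with a prefix-sum pass, bulk-extends
-- # `args` once, and finally renders each clause from its precomputed position.
-- # Mutates `args` in place with the same final content as A.
--
-- def build_tag_sql(tags, evaltype, args: list, id_col: str, tag_table: str, fk_col: str):
--     if not tags:
--         return None
--
--     # Stage 1: normalize to (op, params) rows; params is what goes into args.
--     rows = []
--     for t in tags:
--         op = int(t.get("operator", 0))
--         name = str(t.get("tag", ""))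
--         val = str(t.get("value", ""))
--         if op == 4 or op == 5:
--             rows.append((op, [name]))
--         elif op == 1 or op == 3:
--             rows.append((op, [name, val]))
--         else:
--             rows.append((op, [name, f"%{val}%"]))
--
--     # Stage 2: prefix sums give each row's starting position in args.
--     starts = []
--     cur = len(args)
--     for _, ps in rows:
--         starts.append(cur)
--         cur += len(ps)
--
--     # Stage 3: bulk-extend args once.
--     for _, ps in rows:
--         args.extend(ps)
--
--     # Stage 4: render each clause from its precomputed position.
--     conds = []
--     for (op, ps), s in zip(rows, starts):
--         neg = "NOT " if op == 5 or op == 3 or op == 2 else ""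
--         head = f"EXISTS (SELECT 1 FROM {tag_table} tt WHERE tt.{id_col}={fk_col} AND tt.tag=$"
--         if len(ps) == 1:
--             conds.append(f"{neg}{head}{s + 1})")
--         else:
--             cmp = "=" if op == 1 or op == 3 else " ILIKE "
--             conds.append(f"{neg}{head}{s + 1} AND tt.value{cmp}${s + 2})")
--
--     ev = int(evaltype) if evaltype is not None else 0
--     joiner = " OR " if ev == 1 else " AND "
--     return "(" + joiner.join(conds) + ")"
-- ===== Notes on version B (the rewrite author's own statement) =====
-- stated objective: alternative
-- what changed: Replaces A's single interleaved pass (append-to-args then format inside a six-way if/elif) with a staged pipeline: normalize tags to (op,params) rows, compute every placeholder number with a prefix-sum pass, bulk-extend args once, then render each clause from its precomputed position.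
import Mathlib
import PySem

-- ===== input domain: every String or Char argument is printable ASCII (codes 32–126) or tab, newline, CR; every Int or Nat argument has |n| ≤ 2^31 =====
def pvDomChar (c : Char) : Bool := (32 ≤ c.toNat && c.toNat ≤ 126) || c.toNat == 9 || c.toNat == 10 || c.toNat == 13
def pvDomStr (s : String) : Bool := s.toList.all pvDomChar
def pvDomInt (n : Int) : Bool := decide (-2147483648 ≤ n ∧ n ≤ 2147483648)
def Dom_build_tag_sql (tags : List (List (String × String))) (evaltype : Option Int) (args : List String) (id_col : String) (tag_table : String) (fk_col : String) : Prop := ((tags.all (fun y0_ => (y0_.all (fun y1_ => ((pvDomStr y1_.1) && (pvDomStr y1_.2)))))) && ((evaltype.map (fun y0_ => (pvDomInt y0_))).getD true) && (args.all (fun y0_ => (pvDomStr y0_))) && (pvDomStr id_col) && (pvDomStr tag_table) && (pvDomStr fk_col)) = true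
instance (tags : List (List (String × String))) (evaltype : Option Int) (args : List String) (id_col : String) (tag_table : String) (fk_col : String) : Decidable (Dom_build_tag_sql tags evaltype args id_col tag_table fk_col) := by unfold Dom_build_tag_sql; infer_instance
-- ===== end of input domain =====

-- B replaces A's single interleaved pass by a staged pipeline (normalize rows, prefix-sum
-- positions, bulk-extend, render); both mutate `args` identically in Python, and the
-- theorem is about the return value.

-- ===== PORT A =====
-- t.get(k, default): first-match lookup in the association list (the type convention's dict)
def pvGet (t : List (String × String)) (k : String) : Option String :=
  (t.find? (fun p => p.1 == k)).map (·.2)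

-- int(t.get("operator", 0)); total form via getD 0 — Pre_ excludes inputs where Python's int() raises
def pvOpOf (t : List (String × String)) : Int :=
  match pvGet t "operator" with
  | none => 0
  | some s => (PySem.Int.ofStr? s).getD 0

-- the for-loop of A: carries the mutated `args` and the `conditions` accumulator
def buildA_loop (id_col tag_table fk_col : String) :
    List (List (String × String)) → List String → List String → (List String × List String)
  | [], args, conds => (args, conds)
  | t :: rest, args, conds =>
    let tag_name := (pvGet t "tag").getD ""
    let tag_val := (pvGet t "value").getD ""
    let op := pvOpOf t
    if op == 4 then
      let args := args ++ [tag_name]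
      let n : Int := (args.length : Int)
      buildA_loop id_col tag_table fk_col rest args (conds ++
        ["EXISTS (SELECT 1 FROM " ++ tag_table ++ " tt WHERE tt." ++ id_col ++ "=" ++ fk_col ++ " AND tt.tag=$" ++ PySem.Int.toStr n ++ ")"])
    else if op == 5 then
      let args := args ++ [tag_name]
      let n : Int := (args.length : Int)
      buildA_loop id_col tag_table fk_col rest args (conds ++
        ["NOT EXISTS (SELECT 1 FROM " ++ tag_table ++ " tt WHERE tt." ++ id_col ++ "=" ++ fk_col ++ " AND tt.tag=$" ++ PySem.Int.toStr n ++ ")"])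
    else if op == 1 then
      let args := args ++ [tag_name] ++ [tag_val]
      let n : Int := (args.length : Int)
      buildA_loop id_col tag_table fk_col rest args (conds ++
        ["EXISTS (SELECT 1 FROM " ++ tag_table ++ " tt WHERE tt." ++ id_col ++ "=" ++ fk_col ++ " AND tt.tag=$" ++ PySem.Int.toStr (n-1) ++ " AND tt.value=$" ++ PySem.Int.toStr n ++ ")"])
    else if op == 3 then
      let args := args ++ [tag_name] ++ [tag_val]
      let n : Int := (args.length : Int)
      buildA_loop id_col tag_table fk_col rest args (conds ++
        ["NOT EXISTS (SELECT 1 FROM " ++ tag_table ++ " tt WHERE tt." ++ id_col ++ "=" ++ fk_col ++ " AND tt.tag=$" ++ PySem.Int.toStr (n-1) ++ " AND tt.value=$" ++ PySem.Int.toStr n ++ ")"])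
    else if op == 2 then
      let args := args ++ [tag_name] ++ ["%" ++ tag_val ++ "%"]
      let n : Int := (args.length : Int)
      buildA_loop id_col tag_table fk_col rest args (conds ++
        ["NOT EXISTS (SELECT 1 FROM " ++ tag_table ++ " tt WHERE tt." ++ id_col ++ "=" ++ fk_col ++ " AND tt.tag=$" ++ PySem.Int.toStr (n-1) ++ " AND tt.value ILIKE $" ++ PySem.Int.toStr n ++ ")"])
    else
      let args := args ++ [tag_name] ++ ["%" ++ tag_val ++ "%"]
      let n : Int := (args.length : Int)
      buildA_loop id_col tag_table fk_col rest args (conds ++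
        ["EXISTS (SELECT 1 FROM " ++ tag_table ++ " tt WHERE tt." ++ id_col ++ "=" ++ fk_col ++ " AND tt.tag=$" ++ PySem.Int.toStr (n-1) ++ " AND tt.value ILIKE $" ++ PySem.Int.toStr n ++ ")"])

def build_tag_sql (tags : List (List (String × String))) (evaltype : Option Int) (args : List String) (id_col : String) (tag_table : String) (fk_col : String) : Option String :=
  if tags.isEmpty then none
  else
    let conditions := (buildA_loop id_col tag_table fk_col tags args []).2
    if conditions.isEmpty then none
    else
      let ev : Int := evaltype.getD 0
      let joiner := if ev == 1 then " OR " else " AND "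
      some ("(" ++ PySem.Str.join joiner conditions ++ ")")

-- ===== PORT B =====
-- Stage 1: normalize every tag to an (op, params) row
def pvRowsOf : List (List (String × String)) → List (Int × List String)
  | [] => []
  | t :: rest =>
    let op := pvOpOf t
    let name := (pvGet t "tag").getD ""
    let val := (pvGet t "value").getD ""
    (if op == 4 || op == 5 then (op, [name])
     else if op == 1 || op == 3 then (op, [name, val])
     else (op, [name, "%" ++ val ++ "%"])) :: pvRowsOf rest

-- Stage 2: prefix sums — each row's starting position in args
def pvStartsOf (cur : Int) : List (Int × List String) → List Int
  | [] => []
  | r :: rs => cur :: pvStartsOf (cur + (r.2.length : Int)) rs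

-- Stage 4: render one clause from its precomputed position
def pvRender (id_col tag_table fk_col : String) (op : Int) (ps : List String) (s : Int) : String :=
  let neg := if op == 5 || op == 3 || op == 2 then "NOT " else ""
  let head := "EXISTS (SELECT 1 FROM " ++ tag_table ++ " tt WHERE tt." ++ id_col ++ "=" ++ fk_col ++ " AND tt.tag=$"
  if ps.length == 1 then
    neg ++ head ++ PySem.Int.toStr (s + 1) ++ ")"
  else
    let cmp := if op == 1 || op == 3 then "=" else " ILIKE "
    neg ++ head ++ PySem.Int.toStr (s + 1) ++ " AND tt.value" ++ cmp ++ "$" ++ PySem.Int.toStr (s + 2) ++ ")"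

def build_tag_sql_alt (tags : List (List (String × String))) (evaltype : Option Int) (args : List String) (id_col : String) (tag_table : String) (fk_col : String) : Option String :=
  if tags.isEmpty then none
  else
    let rows := pvRowsOf tags
    let starts := pvStartsOf (args.length : Int) rows
    let conds := (rows.zip starts).map (fun rs => pvRender id_col tag_table fk_col rs.1.1 rs.1.2 rs.2)
    let ev : Int := evaltype.getD 0
    let joiner := if ev == 1 then " OR " else " AND "
    some ("(" ++ PySem.Str.join joiner conds ++ ")")

-- ===== PRECONDITION & SPEC =====
-- Pre_ excludes only tags whose "operator" value is not int()-parsable, where Python A raises ValueError.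
def Pre_build_tag_sql (tags : List (List (String × String))) (evaltype : Option Int) (args : List String) (id_col : String) (tag_table : String) (fk_col : String) : Prop :=
  ∀ t ∈ tags, ∀ s, pvGet t "operator" = some s → (PySem.Int.ofStr? s).isSome
instance (tags : List (List (String × String))) (evaltype : Option Int) (args : List String) (id_col : String) (tag_table : String) (fk_col : String) : Decidable (Pre_build_tag_sql tags evaltype args id_col tag_table fk_col) := by unfold Pre_build_tag_sql; infer_instance

def pvWitness_build_tag_sql : (List (List (String × String))) × Option Int × List String × String × String × String :=
  ([[("tag", "env"), ("value", "prod"), ("operator", "1")], [("tag", "app"), ("operator", "4")]], some 1, ["x"], "hostid", "host_tag", "h.hostid")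

def Spec_build_tag_sql (tags : List (List (String × String))) (evaltype : Option Int) (args : List String) (id_col : String) (tag_table : String) (fk_col : String) (out : Option String) : Prop := out = build_tag_sql_alt tags evaltype args id_col tag_table fk_col
instance (tags : List (List (String × String))) (evaltype : Option Int) (args : List String) (id_col : String) (tag_table : String) (fk_col : String) (out : Option String) : Decidable (Spec_build_tag_sql tags evaltype args id_col tag_table fk_col out) := by unfold Spec_build_tag_sql; infer_instance

-- ===== CLAIM =====
def Claim_equal_build_tag_sql : Prop := ∀ (tags : List (List (String × String))) (evaltype : Option Int) (args : List String) (id_col : String) (tag_table : String) (fk_col : String), Dom_build_tag_sql tags evaltype args id_col tag_table fk_col → Pre_build_tag_sql tags evaltype args id_col tag_table fk_col → Spec_build_tag_sql tags evaltype args id_col tag_table fk_col (build_tag_sql tags evaltype args id_col tag_table fk_col)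

-- ===== LEMMAS AND PROOFS =====

theorem pvNotFuse (s : String) :
    "NOT " ++ ("EXISTS (SELECT 1 FROM " ++ s) = "NOT EXISTS (SELECT 1 FROM " ++ s := by
  rw [← String.append_assoc]; rfl

theorem pvAdd21 (n : Int) : n + 2 - 1 = n + 1 := by ring

theorem pvEqFuse (x : String) :
    " AND tt.value" ++ ("=" ++ ("$" ++ x)) = " AND tt.value=$" ++ x := by
  rw [← String.append_assoc, ← String.append_assoc]; rfl

theorem pvIlikeFuse (x : String) :
    " AND tt.value" ++ (" ILIKE " ++ ("$" ++ x)) = " AND tt.value ILIKE $" ++ x := by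
  rw [← String.append_assoc, ← String.append_assoc]; rfl

-- A's interleaved loop produces exactly B's staged pipeline output
theorem loop_eq_staged (id_col tag_table fk_col : String) (tags : List (List (String × String))) :
    ∀ (args conds : List String),
    (buildA_loop id_col tag_table fk_col tags args conds).2 =
      conds ++ ((pvRowsOf tags).zip (pvStartsOf (args.length : Int) (pvRowsOf tags))).map
        (fun rs => pvRender id_col tag_table fk_col rs.1.1 rs.1.2 rs.2) := by
  induction tags with
  | nil => intro args conds; simp [buildA_loop, pvRowsOf, pvStartsOf]
  | cons t rest ih =>
    intro args conds
    by_cases h4 : pvOpOf t = 4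
    · simp [buildA_loop, pvRowsOf, pvStartsOf, pvRender, h4, ih, String.append_assoc, pvNotFuse, pvEqFuse, pvIlikeFuse, pvAdd21]
    · by_cases h5 : pvOpOf t = 5
      · simp [buildA_loop, pvRowsOf, pvStartsOf, pvRender, h4, h5, ih, String.append_assoc, pvNotFuse, pvEqFuse, pvIlikeFuse, pvAdd21]
      · by_cases h1 : pvOpOf t = 1
        · simp [buildA_loop, pvRowsOf, pvStartsOf, pvRender, h4, h5, h1, ih, String.append_assoc, pvNotFuse, pvEqFuse, pvIlikeFuse, pvAdd21]
        · by_cases h3 : pvOpOf t = 3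
          · simp [buildA_loop, pvRowsOf, pvStartsOf, pvRender, h4, h5, h1, h3, ih, String.append_assoc, pvNotFuse, pvEqFuse, pvIlikeFuse, pvAdd21]
          · by_cases h2 : pvOpOf t = 2
            · simp [buildA_loop, pvRowsOf, pvStartsOf, pvRender, h4, h5, h1, h3, h2, ih, String.append_assoc, pvNotFuse, pvEqFuse, pvIlikeFuse, pvAdd21]
            · simp [buildA_loop, pvRowsOf, pvStartsOf, pvRender, h4, h5, h1, h3, h2, ih, String.append_assoc, pvNotFuse, pvEqFuse, pvIlikeFuse, pvAdd21]

theorem pvStartsOf_length (rs : List (Int × List String)) :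
    ∀ cur, (pvStartsOf cur rs).length = rs.length := by
  induction rs with
  | nil => intro cur; simp [pvStartsOf]
  | cons r rs ih => intro cur; simp [pvStartsOf, ih]

theorem pvRowsOf_length (tags : List (List (String × String))) :
    (pvRowsOf tags).length = tags.length := by
  induction tags with
  | nil => simp [pvRowsOf]
  | cons t rest ih => simp only [pvRowsOf]; split <;> simp_all

-- ===== VERDICT =====
theorem build_tag_sql_spec : Claim_equal_build_tag_sql := by
  intro tags evaltype args id_col tag_table fk_col _ _
  unfold Spec_build_tag_sql build_tag_sql build_tag_sql_alt
  by_cases h : tags.isEmpty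
  · simp [h]
  · have ht : tags.length ≠ 0 := by
      simpa [List.isEmpty_iff, ← List.length_eq_zero_iff] using h
    have hr : pvRowsOf tags ≠ [] := by
      intro he
      have := pvRowsOf_length tags
      rw [he] at this
      simp at this
      omega
    have hs : pvStartsOf ((args.length : Int)) (pvRowsOf tags) ≠ [] := by
      intro he
      have := pvStartsOf_length (pvRowsOf tags) ((args.length : Int))
      rw [he] at this
      simp at this
      exact hr (List.length_eq_zero_iff.mp this.symm)
    have hc : ((buildA_loop id_col tag_table fk_col tags args []).2).isEmpty = false := by
      rw [loop_eq_staged]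
      simp
      exact ⟨hr, hs⟩
    simp [h, hc, loop_eq_staged]
    exact ⟨hr, hs⟩
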